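-- pv_equiv track=rewrite | github.com/AdamZhouSE/pythonHomework | Code/CodeRecords/2974/60580/293024.py | noRotate
-- ===== SOURCE A (Python) =====
-- def isRotate(str):
--     a = len(str)
--     i = 0
--     while i < a:
--         if str[i] != str[a - 1 - i]:
--             return False
--         i += 1
--     if i == a:
--         return True
--
-- def noRotate(str):
--     size = len(str)
--     i = 2
--     result = 0
--     l = []
--     while i <= size:
--         j = 0
--         while (i + j) <= size:
--             if i % 2 == 0 or (not isRotate(str[j:j + i])):
--                 if str[j:j + i] in l:
--                     j += 1
--                     continue
--                 else:
--                     result += 1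
--                     l.append(str[j:j + i])
--             j += 1
--         i += 1
--     return result
-- ===== SOURCE B (Python) =====
-- def noRotate(str):
--     # Complementary counting: all distinct substrings of length >= 2, minus the
--     # distinct odd-length palindromes, which are enumerated by expanding around
--     # each center (no per-substring palindrome test).
--     n = len(str)
--     subs = set()
--     for j in range(n):
--         t = ""
--         for k in range(j, n):
--             t = t + str[k]
--             if len(t) >= 2:
--                 subs.add(t)
--     pals = set()
--     for c in range(n):
--         r = 1
--         while r <= c and c + r < n and str[c - r] == str[c + r]:
--             pals.add(str[c - r:c + r + 1])
--             r += 1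
--     return len(subs) - len(pals)
-- ===== Notes on version B (the rewrite author's own statement) =====
-- stated objective: faster
-- what changed: B counts by complement with different enumeration strategies: it collects all distinct substrings of length >= 2 by extending each suffix one character at a time into a hash set, separately enumerates the distinct odd-length palindromes by expanding around each center while characters match (no per-substring palindrome test and no dedup-list scan), and returns the difference of the two set sizes.
import Mathlib
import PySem

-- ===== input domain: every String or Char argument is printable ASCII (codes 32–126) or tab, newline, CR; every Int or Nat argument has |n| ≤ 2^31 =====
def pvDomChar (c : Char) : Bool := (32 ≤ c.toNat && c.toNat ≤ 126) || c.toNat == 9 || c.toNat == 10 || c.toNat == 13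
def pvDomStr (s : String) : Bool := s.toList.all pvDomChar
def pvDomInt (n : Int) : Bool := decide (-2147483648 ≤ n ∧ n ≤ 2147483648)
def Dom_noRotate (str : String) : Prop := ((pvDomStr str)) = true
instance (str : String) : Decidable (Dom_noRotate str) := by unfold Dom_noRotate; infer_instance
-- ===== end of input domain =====

-- B counts by complement: all distinct length-≥2 substrings (collected by extending each
-- suffix into a set) minus the distinct odd-length palindromes (enumerated by expanding
-- around each center); a timing run measured B faster (no dedup-list scan, no
-- per-substring palindrome test).

-- ===== PORT A =====
-- A's isRotate: compares str[i] with str[a-1-i] for every i < a (a full palindrome scan).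
-- Indices are in range whenever i < a, so List.getD is exact here.
def isRotateGo (cs : List Char) (a i : Nat) : Bool :=
  if i < a then
    if cs.getD i ' ' ≠ cs.getD (a - 1 - i) ' ' then false
    else isRotateGo cs a (i + 1)
  else true
termination_by a - i

def isRotate (cs : List Char) : Bool := isRotateGo cs cs.length 0

def noRotate (str : String) : Int :=
  let cs := str.toList
  let size : Int := cs.length
  let st := (PySem.List.pyRange 2 (size + 1) 1).foldl (fun st i =>
      (PySem.List.pyRange 0 (size - i + 1) 1).foldl (fun st j =>
        let sub := PySem.List.slice cs (some j) (some (j + i))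
        if PySem.Int.mod i 2 == 0 || !(isRotate sub) then
          if sub ∈ st.2 then st else (st.1 + 1, st.2 ++ [sub])
        else st) st)
    ((0 : Int), ([] : List (List Char)))
  st.1

-- ===== PORT B =====
-- B's inner loop body: extend the running substring t by str[k] and record it once len(t) >= 2.
-- k ranges over [j, n), so pyGetD is exact.
def stepB (cs : List Char) (st : List Char × PySem.Set (List Char)) (k : Int) :
    List Char × PySem.Set (List Char) :=
  let t := st.1 ++ [PySem.List.pyGetD cs k ' ']
  (t, if 2 ≤ t.length then PySem.Set.add st.2 t else st.2)

-- B's while loop: expand around center c while r <= c, c + r < n and str[c-r] == str[c+r],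
-- adding str[c-r:c+r+1] each round. c, r, n are the (nonnegative) Python ints.
def expandPals (cs : List Char) (n c : Nat) (r : Nat) (pals : PySem.Set (List Char)) :
    PySem.Set (List Char) :=
  if h : r ≤ c ∧ c + r < n ∧ cs.getD (c - r) ' ' = cs.getD (c + r) ' ' then
    expandPals cs n c (r + 1)
      (PySem.Set.add pals
        (PySem.List.slice cs (some ((c : Int) - (r : Int))) (some ((c : Int) + (r : Int) + 1))))
  else pals
termination_by n - r
decreasing_by omega

def noRotate_alt (str : String) : Int :=
  let cs := str.toList
  let n : Int := cs.length
  let subs : PySem.Set (List Char) :=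
    (PySem.List.pyRange 0 n 1).foldl (fun subs j =>
      ((PySem.List.pyRange j n 1).foldl (stepB cs) (([] : List Char), subs)).2)
      PySem.Set.empty
  let pals : PySem.Set (List Char) :=
    -- c runs over range(n), so c.toNat is exact; r starts at 1
    (PySem.List.pyRange 0 n 1).foldl (fun pals c => expandPals cs n.toNat c.toNat 1 pals)
      PySem.Set.empty
  PySem.Set.len subs - PySem.Set.len pals

-- ===== PRECONDITION & SPEC =====
def Spec_noRotate (str : String) (out : Int) : Prop := out = noRotate_alt str
instance (str : String) (out : Int) : Decidable (Spec_noRotate str out) := by unfold Spec_noRotate; infer_instance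

-- ===== CLAIM (what is proved, stated in full; the proofs are below) =====
def Claim_equal_noRotate : Prop := ∀ (str : String), Dom_noRotate str → Spec_noRotate str (noRotate str)

-- ===== LEMMAS AND PROOFS =====

-- x is a substring of cs of length ≥ 2 (the common membership predicate of both programs).
def IsSub (cs x : List Char) : Prop :=
  ∃ a b : Nat, a + b ≤ cs.length ∧ 2 ≤ b ∧ x = (cs.drop a).take b

-- x is additionally an odd-length palindrome.
def IsOddPal (cs x : List Char) : Prop :=
  IsSub cs x ∧ x.length % 2 = 1 ∧ x.reverse = x

-- elementwise reading of a substring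
theorem sub_length (cs : List Char) (a b : Nat) (hab : a + b ≤ cs.length) :
    ((cs.drop a).take b).length = b := by
  simp only [List.length_take, List.length_drop]; omega

theorem sub_getD (cs : List Char) (a b p : Nat) (hab : a + b ≤ cs.length) (hp : p < b) :
    ((cs.drop a).take b).getD p ' ' = cs.getD (a + p) ' ' := by
  rw [List.getD_eq_getElem _ ' ' (by rw [sub_length cs a b hab]; exact hp),
      List.getD_eq_getElem _ ' ' (by omega)]
  simp [List.getElem_take, List.getElem_drop]

-- a list is its own reverse iff all mirror pairs agree (getD form)
theorem reverse_eq_iff_getD (l : List Char) :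
    l.reverse = l ↔ ∀ p, p < l.length → l.getD p ' ' = l.getD (l.length - 1 - p) ' ' := by
  constructor
  · intro hrev p hp
    conv_lhs => rw [← hrev]
    rw [List.getD_eq_getElem _ ' ' (by simpa using hp), List.getD_eq_getElem l ' ' (by omega)]
    rw [List.getElem_reverse]
  · intro hall
    apply List.ext_getElem (by simp)
    intro k h1 h2
    rw [List.getElem_reverse]
    have := hall k h2
    rw [List.getD_eq_getElem l ' ' h2, List.getD_eq_getElem l ' ' (by omega)] at this
    exact this.symm

-- A's isRotate succeeds from position i iff every remaining index pair matches.
theorem isRotateGo_iff (cs : List Char) (a i : Nat) :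
    isRotateGo cs a i = true ↔ ∀ k, i ≤ k → k < a → cs.getD k ' ' = cs.getD (a - 1 - k) ' ' := by
  fun_induction isRotateGo cs a i with
  | case1 i h hne =>
    simp only [Bool.false_eq_true, false_iff]
    intro hall
    exact hne (hall i le_rfl h)
  | case2 i h hne ih =>
    rw [ih]
    constructor
    · intro hall k hik hka
      rcases Nat.eq_or_lt_of_le hik with rfl | hlt
      · exact not_not.mp hne
      · exact hall k hlt hka
    · intro hall k hik hka
      exact hall k (Nat.le_of_succ_le hik) hka
  | case3 i h =>
    simp only [true_iff]
    intro k hik hka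
    omega

-- isRotate is exactly the palindrome test.
theorem isRotate_iff (cs : List Char) : isRotate cs = true ↔ cs.reverse = cs := by
  rw [isRotate, isRotateGo_iff, reverse_eq_iff_getD]
  constructor
  · intro hall p hp; exact hall p (Nat.zero_le _) hp
  · intro hall k _ hk; exact hall k hk

-- A's dedup condition equals the negation of B's odd-palindrome test.
theorem cond_eq (x : List Char) :
    ((x.length % 2 == 0) || !(isRotate x)) = !((x.length % 2 == 1) && (x == x.reverse)) := by
  have hrot : isRotate x = decide (x.reverse = x) := by
    by_cases hp : x.reverse = x
    · simp [hp, isRotate_iff]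
    · rw [show decide (x.reverse = x) = false by simp [hp], Bool.eq_false_iff]
      exact fun hc => hp ((isRotate_iff x).mp hc)
  have hbeq : (x == x.reverse) = decide (x.reverse = x) := by
    by_cases hp : x.reverse = x
    · rw [hp]; simp
    · have hne : x ≠ x.reverse := fun h => hp h.symm
      simp [hne, hp]
  rw [hrot, hbeq]
  rcases Nat.mod_two_eq_zero_or_one x.length with h | h <;>
    by_cases hp : x.reverse = x <;> simp [h, hp]

theorem nodup_app_single (l : List (List Char)) (m : List Char) (hnd : l.Nodup) (hm : m ∉ l) :
    (l ++ [m]).Nodup := by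
  simp only [List.nodup_append, hnd, true_and]
  refine ⟨List.nodup_singleton m, ?_⟩
  intro a ha b hb
  rw [List.mem_singleton] at hb
  subst hb
  exact fun heq => hm (heq ▸ ha)

-- A's accumulation step, with the parity test rephrased on the substring itself.
def stepA (st : Int × List (List Char)) (t : List Char) : Int × List (List Char) :=
  if (t.length % 2 == 0) || !(isRotate t) then
    if t ∈ st.2 then st else (st.1 + 1, st.2 ++ [t])
  else st

-- Invariant of A's loop: the counter is the length of the dedup list, which holds exactly
-- the qualifying substrings seen so far.
theorem stepA_loop (ms : List (List Char)) (r : Int) (l : List (List Char))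
    (hr : r = (l.length : Int)) (hnd : l.Nodup) :
    (ms.foldl stepA (r, l)).1 = (((ms.foldl stepA (r, l)).2.length : Nat) : Int) ∧
    (ms.foldl stepA (r, l)).2.Nodup ∧
    (∀ x, x ∈ (ms.foldl stepA (r, l)).2 ↔
      x ∈ l ∨ (x ∈ ms ∧ ((x.length % 2 == 0) || !(isRotate x)) = true)) := by
  induction ms generalizing r l with
  | nil => simpa using ⟨hr, hnd⟩
  | cons m ms ih =>
    simp only [List.foldl_cons]
    by_cases hq : ((m.length % 2 == 0) || !(isRotate m)) = true
    · by_cases hm : m ∈ l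
      · rw [show stepA (r, l) m = (r, l) by simp [stepA, hq, hm]]
        obtain ⟨h1, h2, h3⟩ := ih r l hr hnd
        refine ⟨h1, h2, fun x => ?_⟩
        rw [h3 x]
        constructor
        · rintro (hx | ⟨hx, hqx⟩)
          · exact Or.inl hx
          · exact Or.inr ⟨List.mem_cons_of_mem _ hx, hqx⟩
        · rintro (hx | ⟨hx, hqx⟩)
          · exact Or.inl hx
          · rcases List.mem_cons.mp hx with rfl | hx'
            · exact Or.inl hm
            · exact Or.inr ⟨hx', hqx⟩
      · rw [show stepA (r, l) m = (r + 1, l ++ [m]) by simp [stepA, hq, hm]]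
        obtain ⟨h1, h2, h3⟩ := ih (r + 1) (l ++ [m])
          (by simp only [List.length_append, List.length_cons, List.length_nil]; omega)
          (nodup_app_single l m hnd hm)
        refine ⟨h1, h2, fun x => ?_⟩
        rw [h3 x]
        simp only [List.mem_append, List.mem_cons, List.not_mem_nil, or_false]
        constructor
        · rintro ((hx | rfl) | ⟨hx, hqx⟩)
          · exact Or.inl hx
          · exact Or.inr ⟨Or.inl rfl, hq⟩
          · exact Or.inr ⟨Or.inr hx, hqx⟩
        · rintro (hx | ⟨rfl | hx, hqx⟩)
          · exact Or.inl (Or.inl hx)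
          · exact Or.inl (Or.inr rfl)
          · exact Or.inr ⟨hx, hqx⟩
    · rw [show stepA (r, l) m = (r, l) by simp [stepA]; intro h; simp_all]
      obtain ⟨h1, h2, h3⟩ := ih r l hr hnd
      refine ⟨h1, h2, fun x => ?_⟩
      rw [h3 x]
      constructor
      · rintro (hx | ⟨hx, hqx⟩)
        · exact Or.inl hx
        · exact Or.inr ⟨List.mem_cons_of_mem _ hx, hqx⟩
      · rintro (hx | ⟨hx, hqx⟩)
        · exact Or.inl hx
        · rcases List.mem_cons.mp hx with rfl | hx'
          · exact absurd hqx hq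
          · exact Or.inr ⟨hx', hqx⟩

-- Each substring A slices inside its loop bounds has length exactly i.
theorem slice_len (cs : List Char) (i j n : Int) (hn : n = (cs.length : Int))
    (hi2 : 2 ≤ i) (hj : 0 ≤ j) (hji : j ≤ n - i) :
    (((PySem.List.slice cs (some j) (some (j + i))).length : Nat) : Int) = i := by
  rw [PySem.List.slice_toNat cs hj (by omega)]
  simp only [List.length_take, List.length_drop]
  omega

theorem mod_cast_beq (i : Int) (t : List Char) (ht : ((t.length : Nat) : Int) = i) :
    (PySem.Int.mod i 2 == 0) = (t.length % 2 == 0) := by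
  subst ht
  rw [show ((2 : Int)) = ((2 : Nat) : Int) by norm_num, PySem.Int.mod_natCast]
  rcases Nat.mod_two_eq_zero_or_one t.length with h | h <;> simp [h]

-- A's substring pool, as a flat list.
theorem mem_poolA_iff (cs x : List Char) :
    (x ∈ (PySem.List.pyRange 2 ((cs.length : Int) + 1) 1).flatMap (fun i =>
      (PySem.List.pyRange 0 ((cs.length : Int) - i + 1) 1).map (fun j =>
        PySem.List.slice cs (some j) (some (j + i))))) ↔ IsSub cs x := by
  simp only [List.mem_flatMap, List.mem_map, PySem.List.mem_pyRange_one]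
  constructor
  · rintro ⟨i, ⟨hi2, hin⟩, j, ⟨hj0, hjn⟩, rfl⟩
    refine ⟨j.toNat, i.toNat, by omega, by omega, ?_⟩
    have key : ∀ (a b : Nat) (jj ii : Int), jj = (a : Int) → ii = (b : Int) →
        PySem.List.slice cs (some jj) (some (jj + ii)) = (cs.drop a).take b := by
      rintro a b jj ii rfl rfl
      exact PySem.List.slice_natCast_add cs a b
    exact key j.toNat i.toNat j i (by omega) (by omega)
  · rintro ⟨a, b, hab, hb2, rfl⟩
    refine ⟨(b : Int), ⟨by omega, by omega⟩, (a : Int), ⟨by omega, by omega⟩, ?_⟩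
    exact PySem.List.slice_natCast_add cs a b

-- ---- B: the substring-collection pass ----

theorem stepB_inner (cs : List Char) (j m : Nat) (hjm : j ≤ m)
    (s0 : PySem.Set (List Char)) (hnd : s0.Nodup) : m ≤ cs.length →
    ((PySem.List.pyRange (j : Int) (m : Int) 1).foldl (stepB cs) (([] : List Char), s0)).1
        = (cs.drop j).take (m - j) ∧
    ((PySem.List.pyRange (j : Int) (m : Int) 1).foldl (stepB cs) (([] : List Char), s0)).2.Nodup ∧
    (∀ x, x ∈ ((PySem.List.pyRange (j : Int) (m : Int) 1).foldl (stepB cs)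
        (([] : List Char), s0)).2 ↔
      x ∈ s0 ∨ ∃ b, 2 ≤ b ∧ b ≤ m - j ∧ x = (cs.drop j).take b) := by
  induction m, hjm using Nat.le_induction with
  | base =>
    intro _
    rw [PySem.List.pyRange_one_eq_nil (by omega)]
    simp only [List.foldl_nil]
    refine ⟨by simp, hnd, fun x => ?_⟩
    constructor
    · exact fun h => Or.inl h
    · rintro (h | ⟨b, hb2, hb, _⟩)
      · exact h
      · omega
  | succ m hjm ih =>
    intro hm
    rw [show ((m + 1 : Nat) : Int) = (m : Int) + 1 by push_cast; ring,
        PySem.List.pyRange_one_succ_right (by omega), List.foldl_append]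
    obtain ⟨h1, h2, h3⟩ := ih (by omega)
    set st := (PySem.List.pyRange (j : Int) (m : Int) 1).foldl (stepB cs)
        (([] : List Char), s0) with hst
    have hmlt : m < cs.length := by omega
    have htm : st.1 ++ [PySem.List.pyGetD cs (m : Int) ' '] = (cs.drop j).take (m + 1 - j) := by
      rw [h1, PySem.List.pyGetD_natCast, show m + 1 - j = (m - j) + 1 by omega,
          List.take_add_one]
      congr 1
      have hg : (cs.drop j)[m - j]? = some cs[m] := by
        rw [List.getElem?_drop, show j + (m - j) = m by omega,
            List.getElem?_eq_getElem hmlt]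
      rw [hg, List.getD_eq_getElem cs ' ' hmlt]
      rfl
    simp only [List.foldl_cons, List.foldl_nil, stepB, htm]
    have hlen : ((cs.drop j).take (m + 1 - j)).length = m + 1 - j :=
      sub_length cs j (m + 1 - j) (by omega)
    by_cases hb2 : 2 ≤ m + 1 - j
    · rw [if_pos (by rw [hlen]; exact hb2)]
      refine ⟨by trivial, PySem.Set.nodup_add _ _ h2, fun x => ?_⟩
      rw [PySem.Set.mem_add, h3 x]
      constructor
      · rintro ((hx | ⟨b, hb, hbm, rfl⟩) | rfl)
        · exact Or.inl hx
        · exact Or.inr ⟨b, hb, by omega, rfl⟩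
        · exact Or.inr ⟨m + 1 - j, hb2, le_rfl, rfl⟩
      · rintro (hx | ⟨b, hb, hbm, rfl⟩)
        · exact Or.inl (Or.inl hx)
        · rcases Nat.lt_or_ge b (m + 1 - j) with hlt | hge
          · exact Or.inl (Or.inr ⟨b, hb, by omega, rfl⟩)
          · exact Or.inr (by congr 1; omega)
    · rw [if_neg (by rw [hlen]; exact hb2)]
      refine ⟨by trivial, h2, fun x => ?_⟩
      rw [h3 x]
      constructor
      · rintro (hx | ⟨b, hb, hbm, rfl⟩)
        · exact Or.inl hx
        · exact Or.inr ⟨b, hb, by omega, rfl⟩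
      · rintro (hx | ⟨b, hb, hbm, rfl⟩)
        · exact Or.inl hx
        · exact Or.inr ⟨b, hb, by omega, rfl⟩

theorem subsB_spec (cs : List Char) (J : Nat) : J ≤ cs.length →
    ((PySem.List.pyRange 0 (J : Int) 1).foldl (fun subs j =>
        ((PySem.List.pyRange j ((cs.length : Int)) 1).foldl (stepB cs)
          (([] : List Char), subs)).2) PySem.Set.empty).Nodup ∧
    (∀ x, x ∈ (PySem.List.pyRange 0 (J : Int) 1).foldl (fun subs j =>
        ((PySem.List.pyRange j ((cs.length : Int)) 1).foldl (stepB cs)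
          (([] : List Char), subs)).2) PySem.Set.empty ↔
      ∃ a b, a < J ∧ 2 ≤ b ∧ b ≤ cs.length - a ∧ x = (cs.drop a).take b) := by
  induction J with
  | zero =>
    intro _
    rw [PySem.List.pyRange_one_eq_nil (by omega)]
    simp only [List.foldl_nil]
    refine ⟨List.nodup_nil, fun x => ?_⟩
    constructor
    · intro h; exact absurd h (List.not_mem_nil)
    · rintro ⟨a, b, ha, _⟩; omega
  | succ J ih =>
    intro hJ
    obtain ⟨h2, h3⟩ := ih (by omega)
    rw [show ((J + 1 : Nat) : Int) = (J : Int) + 1 by push_cast; ring,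
        PySem.List.pyRange_one_succ_right (by omega), List.foldl_append]
    simp only [List.foldl_cons, List.foldl_nil]
    obtain ⟨g1, g2, g3⟩ := stepB_inner cs J cs.length (by omega) _ h2 le_rfl
    refine ⟨g2, fun x => ?_⟩
    rw [g3 x]
    constructor
    · rintro (hx | ⟨b, hb2, hbm, rfl⟩)
      · obtain ⟨a, b, ha, hb, hba, rfl⟩ := (h3 x).mp hx
        exact ⟨a, b, by omega, hb, hba, rfl⟩
      · exact ⟨J, b, by omega, hb2, hbm, rfl⟩
    · rintro ⟨a, b, ha, hb, hba, rfl⟩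
      rcases Nat.lt_or_ge a J with hlt | hge
      · exact Or.inl ((h3 _).mpr ⟨a, b, hlt, hb, hba, rfl⟩)
      · have : a = J := by omega
        subst this
        exact Or.inr ⟨b, hb, hba, rfl⟩

theorem mem_subsB_iff (cs x : List Char) :
    (x ∈ (PySem.List.pyRange 0 ((cs.length : Int)) 1).foldl (fun subs j =>
        ((PySem.List.pyRange j ((cs.length : Int)) 1).foldl (stepB cs)
          (([] : List Char), subs)).2) PySem.Set.empty) ↔ IsSub cs x := by
  rw [(subsB_spec cs cs.length le_rfl).2 x]
  constructor
  · rintro ⟨a, b, ha, hb, hba, rfl⟩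
    exact ⟨a, b, by omega, hb, rfl⟩
  · rintro ⟨a, b, hab, hb, rfl⟩
    exact ⟨a, b, by omega, hb, by omega, rfl⟩

-- ---- B: the palindrome pass ----

theorem expandPals_nodup (cs : List Char) (n c r : Nat) (s : PySem.Set (List Char))
    (hs : s.Nodup) : (expandPals cs n c r s).Nodup := by
  fun_induction expandPals cs n c r s with
  | case1 r s h ih => exact ih (PySem.Set.nodup_add _ _ hs)
  | case2 r s h => exact hs

theorem expandPals_mem (cs : List Char) (n c : Nat) (hn : n = cs.length) (r : Nat)
    (s : PySem.Set (List Char)) (x : List Char) :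
    x ∈ expandPals cs n c r s ↔ x ∈ s ∨ ∃ q, r ≤ q ∧ q ≤ c ∧ c + q < n ∧
      (∀ k, r ≤ k → k ≤ q → cs.getD (c - k) ' ' = cs.getD (c + k) ' ') ∧
      x = (cs.drop (c - q)).take (2 * q + 1) := by
  fun_induction expandPals cs n c r s with
  | case1 r s h ih =>
    obtain ⟨h1, h2, h3⟩ := h
    rw [ih]
    have hslice : PySem.List.slice cs (some ((c : Int) - (r : Int)))
        (some ((c : Int) + (r : Int) + 1)) = (cs.drop (c - r)).take (2 * r + 1) := by
      have key : ∀ (a b : Nat) (jj ii : Int), jj = (a : Int) → ii = (b : Int) →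
          PySem.List.slice cs (some jj) (some (jj + ii)) = (cs.drop a).take b := by
        rintro a b jj ii rfl rfl
        exact PySem.List.slice_natCast_add cs a b
      have := key (c - r) (2 * r + 1) ((c : Int) - (r : Int)) ((2 * r + 1 : Nat) : Int)
        (by omega) rfl
      rw [show (c : Int) - (r : Int) + ((2 * r + 1 : Nat) : Int) = (c : Int) + (r : Int) + 1 by
        push_cast; ring] at this
      exact this
    rw [PySem.Set.mem_add, hslice]
    constructor
    · rintro ((hx | rfl) | ⟨q, hq1, hq2, hq3, hq4, rfl⟩)
      · exact Or.inl hx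
      · exact Or.inr ⟨r, le_rfl, h1, h2, fun k hk1 hk2 => by
          have : k = r := by omega
          subst this; exact h3, rfl⟩
      · refine Or.inr ⟨q, by omega, hq2, hq3, fun k hk1 hk2 => ?_, rfl⟩
        rcases Nat.eq_or_lt_of_le hk1 with rfl | hlt
        · exact h3
        · exact hq4 k hlt hk2
    · rintro (hx | ⟨q, hq1, hq2, hq3, hq4, rfl⟩)
      · exact Or.inl (Or.inl hx)
      · rcases Nat.eq_or_lt_of_le hq1 with rfl | hlt
        · exact Or.inl (Or.inr rfl)
        · exact Or.inr ⟨q, hlt, hq2, hq3, fun k hk1 hk2 => hq4 k (by omega) hk2, rfl⟩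
  | case2 r s h =>
    constructor
    · exact fun hx => Or.inl hx
    · rintro (hx | ⟨q, hq1, hq2, hq3, hq4, rfl⟩)
      · exact hx
      · exact absurd ⟨by omega, by omega, hq4 r le_rfl hq1⟩ h

-- The center-expansion characterisation equals "odd-length palindrome substring".
theorem center_iff_oddpal (cs x : List Char) :
    (∃ c q : Nat, 1 ≤ q ∧ q ≤ c ∧ c + q < cs.length ∧
      (∀ k, 1 ≤ k → k ≤ q → cs.getD (c - k) ' ' = cs.getD (c + k) ' ') ∧
      x = (cs.drop (c - q)).take (2 * q + 1)) ↔ IsOddPal cs x := by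
  constructor
  · rintro ⟨c, q, hq1, hqc, hcq, hmatch, rfl⟩
    have hab : (c - q) + (2 * q + 1) ≤ cs.length := by omega
    have hlen := sub_length cs (c - q) (2 * q + 1) hab
    refine ⟨⟨c - q, 2 * q + 1, hab, by omega, rfl⟩, by rw [hlen]; omega, ?_⟩
    rw [reverse_eq_iff_getD]
    intro p hp
    rw [hlen] at hp
    rw [hlen, sub_getD cs _ _ p hab hp, sub_getD cs _ _ _ hab (by omega)]
    rcases Nat.lt_or_ge p q with hlt | hge
    · have h1 : c - q + p = c - (q - p) := by omega
      have h2 : c - q + (2 * q + 1 - 1 - p) = c + (q - p) := by omega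
      rw [h1, h2]
      exact hmatch (q - p) (by omega) (by omega)
    · rcases Nat.eq_or_lt_of_le hge with rfl | hgt
      · congr 1; omega
      · have h1 : c - q + p = c + (p - q) := by omega
        have h2 : c - q + (2 * q + 1 - 1 - p) = c - (p - q) := by omega
        rw [h1, h2]
        exact (hmatch (p - q) (by omega) (by omega)).symm
  · rintro ⟨⟨a, b, hab, hb2, rfl⟩, hodd, hpal⟩
    have hlen := sub_length cs a b hab
    rw [hlen] at hodd
    obtain ⟨q, rfl⟩ : ∃ q, b = 2 * q + 1 := ⟨b / 2, by omega⟩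
    have hq1 : 1 ≤ q := by omega
    refine ⟨a + q, q, hq1, by omega, by omega, ?_, by congr 2; omega⟩
    intro k hk1 hkq
    rw [reverse_eq_iff_getD] at hpal
    have := hpal (q - k) (by rw [hlen]; omega)
    rw [hlen] at this
    rw [sub_getD cs a _ (q - k) hab (by omega),
        sub_getD cs a _ (2 * q + 1 - 1 - (q - k)) hab (by omega)] at this
    have h1 : a + (q - k) = a + q - k := by omega
    have h2 : a + (2 * q + 1 - 1 - (q - k)) = a + q + k := by omega
    rw [h1, h2] at this
    exact this

theorem palsB_spec (cs : List Char) (C : Nat) :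
    ((PySem.List.pyRange 0 (C : Int) 1).foldl (fun pals c =>
        expandPals cs cs.length c.toNat 1 pals) PySem.Set.empty).Nodup ∧
    (∀ x, x ∈ (PySem.List.pyRange 0 (C : Int) 1).foldl (fun pals c =>
        expandPals cs cs.length c.toNat 1 pals) PySem.Set.empty ↔
      ∃ c q : Nat, c < C ∧ 1 ≤ q ∧ q ≤ c ∧ c + q < cs.length ∧
        (∀ k, 1 ≤ k → k ≤ q → cs.getD (c - k) ' ' = cs.getD (c + k) ' ') ∧
        x = (cs.drop (c - q)).take (2 * q + 1)) := by
  induction C with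
  | zero =>
    rw [PySem.List.pyRange_one_eq_nil (by omega)]
    simp only [List.foldl_nil]
    refine ⟨List.nodup_nil, fun x => ?_⟩
    constructor
    · intro h; exact absurd h (List.not_mem_nil)
    · rintro ⟨c, q, hc, _⟩; omega
  | succ C ih =>
    obtain ⟨h2, h3⟩ := ih
    rw [show ((C + 1 : Nat) : Int) = (C : Int) + 1 by push_cast; ring,
        PySem.List.pyRange_one_succ_right (by omega), List.foldl_append]
    simp only [List.foldl_cons, List.foldl_nil]
    have htn : ((C : Int)).toNat = C := by omega
    rw [htn]
    refine ⟨expandPals_nodup cs cs.length C 1 _ h2, fun x => ?_⟩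
    rw [expandPals_mem cs cs.length C rfl 1 _ x, h3 x]
    constructor
    · rintro (⟨c, q, hc, rest⟩ | ⟨q, hq⟩)
      · exact ⟨c, q, by omega, rest⟩
      · exact ⟨C, q, by omega, hq⟩
    · rintro ⟨c, q, hc, rest⟩
      rcases Nat.lt_or_ge c C with hlt | hge
      · exact Or.inl ⟨c, q, hlt, rest⟩
      · have : c = C := by omega
        subst this
        exact Or.inr ⟨q, rest⟩

-- boolean odd-palindrome test read as a proposition
theorem pb_iff (x : List Char) :
    ((x.length % 2 == 1) && (x == x.reverse)) = true ↔
      (x.length % 2 = 1 ∧ x.reverse = x) := by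
  simp [Bool.and_eq_true, beq_iff_eq, eq_comm (a := x)]

-- ===== main equivalence (stated on the character list) =====
theorem main_eq (cs : List Char) :
    ((PySem.List.pyRange 2 ((cs.length : Int) + 1) 1).foldl (fun st i =>
      (PySem.List.pyRange 0 ((cs.length : Int) - i + 1) 1).foldl (fun st j =>
        let sub := PySem.List.slice cs (some j) (some (j + i))
        if PySem.Int.mod i 2 == 0 || !(isRotate sub) then
          if sub ∈ st.2 then st else (st.1 + 1, st.2 ++ [sub])
        else st) st)
      ((0 : Int), ([] : List (List Char)))).1 =
    PySem.Set.len ((PySem.List.pyRange 0 ((cs.length : Int)) 1).foldl (fun subs j =>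
        ((PySem.List.pyRange j ((cs.length : Int)) 1).foldl (stepB cs)
          (([] : List Char), subs)).2) PySem.Set.empty) -
    PySem.Set.len ((PySem.List.pyRange 0 ((cs.length : Int)) 1).foldl (fun pals c =>
        expandPals cs ((cs.length : Int)).toNat c.toNat 1 pals) PySem.Set.empty) := by
  set n : Int := (cs.length : Int) with hn
  set S : List (List Char) := (PySem.List.pyRange 2 (n + 1) 1).flatMap (fun i =>
      (PySem.List.pyRange 0 (n - i + 1) 1).map (fun j =>
        PySem.List.slice cs (some j) (some (j + i)))) with hS
  have hA : (PySem.List.pyRange 2 (n + 1) 1).foldl (fun st i =>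
      (PySem.List.pyRange 0 (n - i + 1) 1).foldl (fun st j =>
        let sub := PySem.List.slice cs (some j) (some (j + i))
        if PySem.Int.mod i 2 == 0 || !(isRotate sub) then
          if sub ∈ st.2 then st else (st.1 + 1, st.2 ++ [sub])
        else st) st)
      ((0 : Int), ([] : List (List Char))) = S.foldl stepA ((0 : Int), ([] : List (List Char))) := by
    rw [hS, List.foldl_flatMap]
    refine PySem.List.foldl_congr_mem _ _ _ _ ?_
    intro st i hi
    rw [List.foldl_map]
    refine PySem.List.foldl_congr_mem _ _ _ _ ?_
    intro st' j hj
    rw [PySem.List.mem_pyRange_one] at hi hj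
    have ht := slice_len cs i j n hn (by omega) (by omega) (by omega)
    show _ = stepA st' (PySem.List.slice cs (some j) (some (j + i)))
    rw [stepA, mod_cast_beq i _ ht]
  rw [hA]
  obtain ⟨h1, h2, h3⟩ := stepA_loop S 0 [] (by simp) List.nodup_nil
  rw [h1]
  set subs := (PySem.List.pyRange 0 n 1).foldl (fun subs j =>
      ((PySem.List.pyRange j n 1).foldl (stepB cs) (([] : List Char), subs)).2)
      PySem.Set.empty with hsubs
  set pals := (PySem.List.pyRange 0 n 1).foldl (fun pals c =>
      expandPals cs n.toNat c.toNat 1 pals) PySem.Set.empty with hpals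
  have hn' : n.toNat = cs.length := by omega
  have hsubs_nd : subs.Nodup := by
    rw [hsubs, hn]; exact (subsB_spec cs cs.length le_rfl).1
  have hsubs_mem : ∀ x, x ∈ subs ↔ IsSub cs x := by
    intro x; rw [hsubs, hn]; exact mem_subsB_iff cs x
  have hpals_nd : pals.Nodup := by
    rw [hpals, hn, Int.toNat_natCast]
    exact (palsB_spec cs cs.length).1
  have hpals_mem : ∀ x, x ∈ pals ↔ IsOddPal cs x := by
    intro x
    rw [hpals, hn, Int.toNat_natCast]
    rw [(palsB_spec cs cs.length).2 x, ← center_iff_oddpal cs x]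
    constructor
    · rintro ⟨c, q, _, rest⟩; exact ⟨c, q, rest⟩
    · rintro ⟨c, q, hq1, hqc, hcq, rest⟩; exact ⟨c, q, by omega, hq1, hqc, hcq, rest⟩
  set p : List Char → Bool := fun t => (t.length % 2 == 1) && (t == t.reverse) with hp
  have hAperm : (S.foldl stepA ((0 : Int), ([] : List (List Char)))).2.Perm
      (subs.filter (fun t => !(p t))) := by
    rw [List.perm_ext_iff_of_nodup h2 (List.Nodup.filter _ hsubs_nd)]
    intro x
    rw [h3 x, List.mem_filter, hsubs_mem x]
    have hpool : x ∈ S ↔ IsSub cs x := by rw [hS, hn]; exact mem_poolA_iff cs x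
    rw [hpool, show ((x.length % 2 == 0) || !(isRotate x)) = !(p x) from cond_eq x]
    simp
  have hPperm : pals.Perm (subs.filter p) := by
    rw [List.perm_ext_iff_of_nodup hpals_nd (List.Nodup.filter _ hsubs_nd)]
    intro x
    rw [hpals_mem x, List.mem_filter, hsubs_mem x]
    constructor
    · rintro ⟨hsub, hodd, hrev⟩
      exact ⟨hsub, (pb_iff x).mpr ⟨hodd, hrev⟩⟩
    · rintro ⟨hsub, hb⟩
      obtain ⟨hodd, hrev⟩ := (pb_iff x).mp hb
      exact ⟨hsub, hodd, hrev⟩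
  have hlenA := hAperm.length_eq
  have hlenP := hPperm.length_eq
  have hsplit : subs.length = (subs.filter p).length + (subs.filter (fun t => !(p t))).length :=
    List.length_eq_length_filter_add (l := subs) p
  simp only [PySem.Set.len]
  omega

-- ===== VERDICT (by name: the statement is the Claim_ definition above) =====
theorem noRotate_spec : Claim_equal_noRotate := by
  intro str _
  show noRotate str = noRotate_alt str
  exact main_eq str.toList
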